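-- pv_equiv track=rewrite | github.com/plilja/project-euler | problem_61/cyclical_figurate_numbers.py | _find_cyclical
-- ===== SOURCE A (Python) =====
-- def _find_cyclical(starting_two_digits, values):
--     if not values:
--         return [[]]
--     head, tail = values[0], values[1:]
--     res = []
--     for value in head:
--         if str(value)[:2] == starting_two_digits:
--             sub_results = _find_cyclical(str(value)[-2:], tail)
--             res += [[value] + sub_result for sub_result in sub_results]
--     return res
-- ===== SOURCE B (Python) =====
-- def _find_cyclical(starting_two_digits, values):
--     # Bottom-up dynamic programming: sweep the groups right-to-left, tabulating
--     # by leading two digits all chains through the remaining groups; the answer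
--     # is one table lookup, with no recursion and no recomputation of subtrees
--     # (it tabulates chains from every prefix, trading work on unreachable ones).
--     table = None  # None = "no groups left": any prefix yields the single empty chain
--     for group in reversed(values):
--         new_table = {}
--         for v in group:
--             s = str(v)
--             subs = [[]] if table is None else table.get(s[-2:], [])
--             new_table.setdefault(s[:2], []).extend([v] + sub for sub in subs)
--         table = new_table
--     return [[]] if table is None else table.get(starting_two_digits, [])
-- ===== Notes on version B (the rewrite author's own statement) =====
-- stated objective: alternative
-- what changed: B replaces A's top-down recursion (which re-solves the remaining-groups subproblem for every matching value) by an iterative bottom-up dynamic program: one right-to-left sweep builds, per level, a table from two-digit prefix to all chains through the remaining groups, and the answer is a single lookup; it trades A's start-prefix pruning for subproblem sharing, so it tabulates chains from every prefix and can be slower when few prefixes are reachable from the start.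
import Mathlib
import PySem

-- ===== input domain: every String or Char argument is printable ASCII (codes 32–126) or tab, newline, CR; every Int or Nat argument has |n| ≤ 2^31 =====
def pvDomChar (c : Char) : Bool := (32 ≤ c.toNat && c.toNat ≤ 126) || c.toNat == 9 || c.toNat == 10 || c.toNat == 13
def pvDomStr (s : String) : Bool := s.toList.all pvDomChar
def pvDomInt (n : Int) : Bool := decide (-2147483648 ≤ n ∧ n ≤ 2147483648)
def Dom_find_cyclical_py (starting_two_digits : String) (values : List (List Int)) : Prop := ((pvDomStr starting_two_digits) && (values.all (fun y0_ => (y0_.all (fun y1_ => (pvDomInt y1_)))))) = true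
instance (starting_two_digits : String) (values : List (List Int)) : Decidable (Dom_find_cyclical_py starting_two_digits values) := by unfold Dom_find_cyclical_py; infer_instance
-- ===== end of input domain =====

-- B replaces A's top-down recursion by a bottom-up right-to-left DP table keyed by the two leading digits (alternative algorithm; same return value).


-- ===== PORT A =====
def find_cyclical_py (starting_two_digits : String) (values : List (List Int)) : List (List Int) :=
  match values with
  | [] => [[]]
  | head :: tail =>
      head.foldl (fun res value =>
        if PySem.Str.slice (PySem.Int.toStr value) none (some 2) == starting_two_digits then
          res ++ (find_cyclical_py (PySem.Str.slice (PySem.Int.toStr value) (some (-2)) none) tail).map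
                   (fun sub_result => value :: sub_result)
        else res) []

-- ===== PORT B =====
-- one sweep step: fold the group into a fresh dict; `prev = none` means "no groups left"
-- (Python's `table = None`), where every prefix yields the single empty chain.
def pvStep (prev : Option (PySem.Dict String (List (List Int)))) (group : List Int) :
    Option (PySem.Dict String (List (List Int))) :=
  some (group.foldl (fun new_table v =>
    let s := PySem.Int.toStr v
    let subs := match prev with
      | none => [[]]
      | some t => t.getD (PySem.Str.slice s (some (-2)) none) []
    new_table.modify (PySem.Str.slice s none (some 2)) []
      (fun l => l ++ subs.map (fun sub => v :: sub))) PySem.Dict.empty)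

def find_cyclical_py_alt (starting_two_digits : String) (values : List (List Int)) : List (List Int) :=
  match values.reverse.foldl pvStep none with
  | none => [[]]
  | some t => t.getD starting_two_digits []

-- ===== PRECONDITION & SPEC =====
def Spec_find_cyclical_py (starting_two_digits : String) (values : List (List Int)) (out : List (List Int)) : Prop := out = find_cyclical_py_alt starting_two_digits values
instance (starting_two_digits : String) (values : List (List Int)) (out : List (List Int)) : Decidable (Spec_find_cyclical_py starting_two_digits values out) := by unfold Spec_find_cyclical_py; infer_instance

-- ===== CLAIM (what is proved, stated in full; the proofs are below) =====
def Claim_equal_find_cyclical_py : Prop := ∀ (starting_two_digits : String) (values : List (List Int)), Dom_find_cyclical_py starting_two_digits values → Spec_find_cyclical_py starting_two_digits values (find_cyclical_py starting_two_digits values)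

-- ===== LEMMAS AND PROOFS =====

-- read the DP state at a prefix
def pvGetT (o : Option (PySem.Dict String (List (List Int)))) (p : String) : List (List Int) :=
  match o with
  | none => [[]]
  | some t => t.getD p []

-- the group fold accumulates, per prefix p, the chains of the matching values in group order
theorem pvStep_getD_aux (prev : Option (PySem.Dict String (List (List Int))))
    (group : List Int) (p : String) (d : PySem.Dict String (List (List Int))) :
    (group.foldl (fun new_table v =>
        let s := PySem.Int.toStr v
        let subs := match prev with
          | none => [[]]
          | some t => t.getD (PySem.Str.slice s (some (-2)) none) []
        new_table.modify (PySem.Str.slice s none (some 2)) []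
          (fun l => l ++ subs.map (fun sub => v :: sub))) d).getD p []
      = d.getD p [] ++
        (group.filter (fun v => PySem.Str.slice (PySem.Int.toStr v) none (some 2) == p)).flatMap
          (fun v => (pvGetT prev (PySem.Str.slice (PySem.Int.toStr v) (some (-2)) none)).map
                      (fun sub => v :: sub)) := by
  induction group generalizing d with
  | nil => simp
  | cons v rest ih =>
    simp only [List.foldl_cons, List.filter_cons]
    by_cases h : PySem.Str.slice (PySem.Int.toStr v) none (some 2) = p
    · rw [ih, h, PySem.Dict.getD_modify_self]
      cases prev <;> simp [pvGetT]
    · rw [ih, PySem.Dict.getD_modify_of_ne _ _ _ (fun hp => h hp.symm)]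
      simp [h]

theorem flatMap_ite_filter {α β : Type} (p : α → Bool) (g : α → List β) (l : List α) :
    (l.flatMap fun x => if p x then g x else []) = (l.filter p).flatMap g := by
  induction l with
  | nil => rfl
  | cons x xs ih =>
    by_cases h : p x <;> simp [h, ih]

-- the DP table computed from the remaining groups tabulates A's recursion at every prefix
theorem pvFoldr_getT (values : List (List Int)) :
    ∀ p, pvGetT (values.foldr (fun g acc => pvStep acc g) none) p = find_cyclical_py p values := by
  induction values with
  | nil => intro p; rfl
  | cons head tail ih =>
    intro p
    rw [List.foldr_cons]
    show pvGetT (pvStep (tail.foldr (fun g acc => pvStep acc g) none) head) p = _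
    rw [show pvGetT (pvStep (tail.foldr (fun g acc => pvStep acc g) none) head) p
          = ((head.foldl (fun new_table v =>
              let s := PySem.Int.toStr v
              let subs := match tail.foldr (fun g acc => pvStep acc g) none with
                | none => [[]]
                | some t => t.getD (PySem.Str.slice s (some (-2)) none) []
              new_table.modify (PySem.Str.slice s none (some 2))
                [] (fun l => l ++ subs.map (fun sub => v :: sub))) PySem.Dict.empty).getD p [])
        from rfl,
        pvStep_getD_aux]
    show [] ++ _ = _
    rw [List.nil_append]
    -- rewrite each table read via the induction hypothesis
    have hsub : ∀ v : Int,
        pvGetT (tail.foldr (fun g acc => pvStep acc g) none)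
            (PySem.Str.slice (PySem.Int.toStr v) (some (-2)) none)
          = find_cyclical_py (PySem.Str.slice (PySem.Int.toStr v) (some (-2)) none) tail :=
      fun v => ih _
    -- unfold A on head :: tail into the same filter/flatMap shape
    show _ = head.foldl (fun res value =>
        if PySem.Str.slice (PySem.Int.toStr value) none (some 2) == p then
          res ++ (find_cyclical_py (PySem.Str.slice (PySem.Int.toStr value) (some (-2)) none) tail).map
                   (fun sub_result => value :: sub_result)
        else res) []
    have hA : (fun (res : List (List Int)) value =>
        if PySem.Str.slice (PySem.Int.toStr value) none (some 2) == p then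
          res ++ (find_cyclical_py (PySem.Str.slice (PySem.Int.toStr value) (some (-2)) none) tail).map
                   (fun sub_result => value :: sub_result)
        else res)
        = fun res value => res ++
            (if PySem.Str.slice (PySem.Int.toStr value) none (some 2) == p then
              (find_cyclical_py (PySem.Str.slice (PySem.Int.toStr value) (some (-2)) none) tail).map
                (fun sub_result => value :: sub_result)
            else []) := by
      funext res value; split <;> simp
    rw [hA, PySem.List.foldl_append_eq_flatMap, List.nil_append, flatMap_ite_filter]
    exact List.flatMap_congr (fun v _ => by rw [hsub])

-- ===== VERDICT (by name: the statement is the Claim_ definition above) =====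
theorem find_cyclical_py_spec : Claim_equal_find_cyclical_py := by
  intro s values _
  show find_cyclical_py s values = find_cyclical_py_alt s values
  unfold find_cyclical_py_alt
  rw [List.foldl_reverse]
  exact (pvFoldr_getT values s).symm
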